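-- pv_equiv track=rewrite | github.com/samikmaharjan55/Disease-Diagnosis | chest_pain.py | segcp
-- ===== SOURCE A (Python) =====
-- def segcp (arr1,arr2,cpval):
--     o0 = 0
--     o1 = 0
--     o2 = 0
--     o3 = 0
--     o4 = 0
--     for i in range(len(arr1)):
--         if arr1[i] == cpval:
--             if arr2[i] ==0:
--                 o0+=1
--             elif arr2[i] ==1:
--                 o1+=1
--             elif arr2[i] == 2:
--                 o2 += 1
--             elif arr2[i] ==3:
--                 o3+=1
--             elif arr2[i] ==4:
--                 o4+=1
--     return [o0,o1,o2,o3,o4]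
-- ===== SOURCE B (Python) =====
-- def segcp(arr1, arr2, cpval):
--     # Sort-and-scan counting: collect the category values at matching positions,
--     # sort them, then read off each category's run length with a moving pointer.
--     matched = sorted(b for a, b in zip(arr1, arr2) if a == cpval and 0 <= b <= 4)
--     out = []
--     i = 0
--     for v in range(5):
--         j = i
--         while j < len(matched) and matched[j] == v:
--             j += 1
--         out.append(j - i)
--         i = j
--     return out
-- ===== Notes on version B (the rewrite author's own statement) =====
-- stated objective: alternative
-- what changed: Replaces the five-counter branching pass by sort-based counting: collect the in-range category values at matching positions, sort them, then read each category's count off as a run length with a moving pointer.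
import Mathlib
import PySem

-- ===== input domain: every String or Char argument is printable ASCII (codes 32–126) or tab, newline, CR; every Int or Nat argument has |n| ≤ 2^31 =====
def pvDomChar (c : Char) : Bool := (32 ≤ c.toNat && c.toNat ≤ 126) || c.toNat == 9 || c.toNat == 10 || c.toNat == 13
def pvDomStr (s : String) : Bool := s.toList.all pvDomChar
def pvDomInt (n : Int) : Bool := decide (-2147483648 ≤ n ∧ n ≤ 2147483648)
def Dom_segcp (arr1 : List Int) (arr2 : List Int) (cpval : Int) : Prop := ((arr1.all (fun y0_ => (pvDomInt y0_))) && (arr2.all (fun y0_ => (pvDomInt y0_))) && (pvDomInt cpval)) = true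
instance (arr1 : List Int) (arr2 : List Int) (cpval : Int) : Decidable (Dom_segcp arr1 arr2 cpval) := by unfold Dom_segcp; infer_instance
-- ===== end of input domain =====

-- B replaces A's five-counter branching pass by sort-based counting (sort the matched
-- category values, then read each count off as a run length); objective: alternative.

-- ===== PORT A =====
def segcp (arr1 : List Int) (arr2 : List Int) (cpval : Int) : List Int :=
  let r := (PySem.List.pyRange 0 (arr1.length : Int) 1).foldl
    (fun (st : Int × Int × Int × Int × Int) i =>
      if PySem.List.pyGetD arr1 i 0 = cpval then
        if PySem.List.pyGetD arr2 i 0 = 0 then (st.1 + 1, st.2.1, st.2.2.1, st.2.2.2.1, st.2.2.2.2)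
        else if PySem.List.pyGetD arr2 i 0 = 1 then (st.1, st.2.1 + 1, st.2.2.1, st.2.2.2.1, st.2.2.2.2)
        else if PySem.List.pyGetD arr2 i 0 = 2 then (st.1, st.2.1, st.2.2.1 + 1, st.2.2.2.1, st.2.2.2.2)
        else if PySem.List.pyGetD arr2 i 0 = 3 then (st.1, st.2.1, st.2.2.1, st.2.2.2.1 + 1, st.2.2.2.2)
        else if PySem.List.pyGetD arr2 i 0 = 4 then (st.1, st.2.1, st.2.2.1, st.2.2.2.1, st.2.2.2.2 + 1)
        else st
      else st)
    (0, 0, 0, 0, 0)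
  [r.1, r.2.1, r.2.2.1, r.2.2.2.1, r.2.2.2.2]

-- ===== PORT B =====
-- the inner 'while j < len(matched) and matched[j] == v: j += 1' of Source B
-- (fuel = m.length bounds the loop; it only makes the same while-loop total)
def segcpAdvance (m : List Int) (v : Int) : Nat → Nat → Nat
  | 0, j => j
  | fuel + 1, j => if j < m.length ∧ m.getD j 0 = v then segcpAdvance m v fuel (j + 1) else j

def segcp_alt (arr1 : List Int) (arr2 : List Int) (cpval : Int) : List Int :=
  let matched := PySem.List.sorted
    (((arr1.zip arr2).filter (fun p => decide (p.1 = cpval ∧ 0 ≤ p.2 ∧ p.2 ≤ 4))).map Prod.snd)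
    (fun x => x) false
  let st := (PySem.List.pyRange 0 5 1).foldl
    (fun (st : List Int × Nat) v =>
      let j := segcpAdvance matched v matched.length st.2
      (st.1 ++ [(j : Int) - (st.2 : Int)], j))
    ([], 0)
  st.1

-- ===== PRECONDITION & SPEC =====
-- Pre_ excludes exactly the inputs where Python A raises IndexError: some index with
-- arr1[i] == cpval is out of range for arr2.
def Pre_segcp (arr1 : List Int) (arr2 : List Int) (cpval : Int) : Prop :=
  ∀ i : Nat, i < arr1.length → arr1.getD i 0 = cpval → i < arr2.length
instance (arr1 : List Int) (arr2 : List Int) (cpval : Int) : Decidable (Pre_segcp arr1 arr2 cpval) := by unfold Pre_segcp; infer_instance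
def pvWitness_segcp : List Int × List Int × Int := ([1, 2, 1], [0, 4, 2], 1)

def Spec_segcp (arr1 : List Int) (arr2 : List Int) (cpval : Int) (out : List Int) : Prop := out = segcp_alt arr1 arr2 cpval
instance (arr1 : List Int) (arr2 : List Int) (cpval : Int) (out : List Int) : Decidable (Spec_segcp arr1 arr2 cpval out) := by unfold Spec_segcp; infer_instance

-- ===== CLAIM (what is proved, stated in full; the proofs are below) =====
def Claim_equal_segcp : Prop := ∀ (arr1 : List Int) (arr2 : List Int) (cpval : Int), Dom_segcp arr1 arr2 cpval → Pre_segcp arr1 arr2 cpval → Spec_segcp arr1 arr2 cpval (segcp arr1 arr2 cpval)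

-- ===== LEMMAS AND PROOFS =====

-- A's loop, reformulated: first accumulate the matched values, then tally them.
def segcpTally (st : Int × Int × Int × Int × Int) (m : List Int) : Int × Int × Int × Int × Int :=
  m.foldl (fun st v =>
    if v = 0 then (st.1 + 1, st.2.1, st.2.2.1, st.2.2.2.1, st.2.2.2.2)
    else if v = 1 then (st.1, st.2.1 + 1, st.2.2.1, st.2.2.2.1, st.2.2.2.2)
    else if v = 2 then (st.1, st.2.1, st.2.2.1 + 1, st.2.2.2.1, st.2.2.2.2)
    else if v = 3 then (st.1, st.2.1, st.2.2.1, st.2.2.2.1 + 1, st.2.2.2.2)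
    else if v = 4 then (st.1, st.2.1, st.2.2.1, st.2.2.2.1, st.2.2.2.2 + 1)
    else st) st

theorem segcp_fold_eq_tally (arr1 arr2 : List Int) (cpval : Int) (L : List Int)
    (st : Int × Int × Int × Int × Int) :
    L.foldl
      (fun (st : Int × Int × Int × Int × Int) i =>
        if PySem.List.pyGetD arr1 i 0 = cpval then
          if PySem.List.pyGetD arr2 i 0 = 0 then (st.1 + 1, st.2.1, st.2.2.1, st.2.2.2.1, st.2.2.2.2)
          else if PySem.List.pyGetD arr2 i 0 = 1 then (st.1, st.2.1 + 1, st.2.2.1, st.2.2.2.1, st.2.2.2.2)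
          else if PySem.List.pyGetD arr2 i 0 = 2 then (st.1, st.2.1, st.2.2.1 + 1, st.2.2.2.1, st.2.2.2.2)
          else if PySem.List.pyGetD arr2 i 0 = 3 then (st.1, st.2.1, st.2.2.1, st.2.2.2.1 + 1, st.2.2.2.2)
          else if PySem.List.pyGetD arr2 i 0 = 4 then (st.1, st.2.1, st.2.2.1, st.2.2.2.1, st.2.2.2.2 + 1)
          else st
        else st)
      st
    = segcpTally st
        ((L.filter (fun i => decide (PySem.List.pyGetD arr1 i 0 = cpval))).map
          (fun i => PySem.List.pyGetD arr2 i 0)) := by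
  induction L generalizing st with
  | nil => rfl
  | cons a L ih =>
    simp only [List.foldl_cons, List.filter_cons]
    by_cases h : PySem.List.pyGetD arr1 a 0 = cpval
    · simp [h, segcpTally, ih]
    · simp [h, ih]

theorem segcpTally_eq_counts (m : List Int) (st : Int × Int × Int × Int × Int) :
    segcpTally st m =
      (st.1 + m.count 0, st.2.1 + m.count 1, st.2.2.1 + m.count 2,
       st.2.2.2.1 + m.count 3, st.2.2.2.2 + m.count 4) := by
  induction m generalizing st with
  | nil => simp [segcpTally]
  | cons v m ih =>
    simp only [segcpTally, List.foldl_cons] at *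
    rw [ih]
    simp only [List.count_cons, beq_iff_eq, Prod.mk.injEq]
    split_ifs <;> push_cast <;> omega

-- under Pre_, the index-driven matched values of A equal the zip-driven ones of B
theorem segcp_idx_eq_zip (arr1 arr2 : List Int) (cpval : Int)
    (hpre : ∀ i : Nat, i < arr1.length → arr1.getD i 0 = cpval → i < arr2.length) :
    ((List.range arr1.length).filter (fun i => decide (arr1.getD i 0 = cpval))).map
        (fun i => arr2.getD i 0)
      = ((arr1.zip arr2).filter (fun p => decide (p.1 = cpval))).map Prod.snd := by
  induction arr1 generalizing arr2 with
  | nil => simp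
  | cons a t ih =>
    cases arr2 with
    | nil =>
      have hnone : ∀ i ∈ List.range (a :: t).length,
          ¬ ((fun i => decide ((a :: t).getD i 0 = cpval)) i = true) := by
        intro i hi hmatch
        have hi' : i < (a :: t).length := List.mem_range.mp hi
        have := hpre i hi' (by simpa using hmatch)
        simp at this
      rw [List.filter_eq_nil_iff.mpr hnone]
      simp
    | cons b u =>
      have hshift : ∀ i : Nat, i < t.length → t.getD i 0 = cpval → i < u.length := by
        intro i hi hm
        have := hpre (i + 1) (by simpa using Nat.succ_lt_succ hi) (by simpa using hm)
        simpa using Nat.lt_of_succ_lt_succ this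
      have ihk := ih u hshift
      simp only [List.length_cons, List.range_succ_eq_map, List.filter_cons,
        List.filter_map, List.zip_cons_cons]
      by_cases ha : a = cpval
      · simpa [ha, List.map_map, Function.comp_def, List.getD_cons_succ] using ihk
      · simpa [ha, List.map_map, Function.comp_def, List.getD_cons_succ] using ihk

-- the while-loop pointer skips exactly the run of v's starting at position p.length
theorem segcpAdvance_run (v : Int) (r p s : List Int) (fuel : Nat)
    (hfuel : r.length ≤ fuel) (hr : ∀ x ∈ r, x = v) (hs : ∀ x ∈ s, x ≠ v) :
    segcpAdvance (p ++ r ++ s) v fuel p.length = p.length + r.length := by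
  induction r generalizing p fuel with
  | nil =>
    cases fuel with
    | zero => simp [segcpAdvance]
    | succ f =>
      cases s with
      | nil => simp [segcpAdvance]
      | cons x s' =>
        have hx : (p ++ ([] : List Int) ++ x :: s').getD p.length 0 = x := by
          rw [List.append_nil, List.getD_append_right _ _ _ _ (le_refl _)]
          simp
        have hcond : ¬ (p.length < (p ++ ([] : List Int) ++ x :: s').length ∧
            (p ++ ([] : List Int) ++ x :: s').getD p.length 0 = v) := by
          rintro ⟨-, h⟩
          rw [hx] at h
          exact hs x (by simp) h
        rw [segcpAdvance, if_neg hcond]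
        simp
  | cons w r' ihr =>
    cases fuel with
    | zero => simp at hfuel
    | succ f =>
      have hw : w = v := hr w (by simp)
      have hget : (p ++ (w :: r') ++ s).getD p.length 0 = w := by
        rw [List.append_assoc, List.getD_append_right _ _ _ _ (le_refl _)]
        simp
      have hlt : p.length < (p ++ (w :: r') ++ s).length := by
        simp
      rw [segcpAdvance, if_pos ⟨hlt, by rw [hget, hw]⟩]
      have hre : p ++ (w :: r') ++ s = (p ++ [w]) ++ r' ++ s := by simp
      have := ihr (p ++ [w]) f (by simpa using Nat.le_of_succ_le_succ hfuel)
        (fun x hx => hr x (by simp [hx])) 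
      rw [hre, show p.length + 1 = (p ++ [w]).length by simp, this]
      simp; omega

-- five consecutive replicate blocks, the canonical sorted form of the matched values
def segcpRep (n0 n1 n2 n3 n4 : Nat) : List Int :=
  List.replicate n0 0 ++ List.replicate n1 1 ++ List.replicate n2 2 ++
    List.replicate n3 3 ++ List.replicate n4 4

theorem sorted_eq_rep (base : List Int) (hall : ∀ x ∈ base, 0 ≤ x ∧ x ≤ 4) :
    PySem.List.sorted base (fun x => x)
      = segcpRep (base.count 0) (base.count 1) (base.count 2) (base.count 3) (base.count 4) := by
  apply PySem.List.sorted_id_eq_of_perm_of_pairwise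
  · rw [List.perm_iff_count]
    intro x
    simp only [segcpRep, List.count_append, List.count_replicate, beq_iff_eq]
    by_cases h0 : (0 : Int) = x
    · subst h0; simp
    by_cases h1 : (1 : Int) = x
    · subst h1; simp
    by_cases h2 : (2 : Int) = x
    · subst h2; simp
    by_cases h3 : (3 : Int) = x
    · subst h3; simp
    by_cases h4 : (4 : Int) = x
    · subst h4; simp
    simp only [h0, h1, h2, h3, h4, if_false]
    symm
    rw [List.count_eq_zero]
    intro hx
    have := hall x hx
    omega
  · simp only [segcpRep, List.pairwise_append, List.pairwise_replicate,
      List.mem_replicate, List.mem_append]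
    and_intros <;> (intros; omega)

-- evaluating B's scan on the canonical block form
theorem segcp_alt_fold (n0 n1 n2 n3 n4 : Nat) :
    ((PySem.List.pyRange 0 5 1).foldl
      (fun (st : List Int × Nat) v =>
        let j := segcpAdvance (segcpRep n0 n1 n2 n3 n4) v (segcpRep n0 n1 n2 n3 n4).length st.2
        (st.1 ++ [(j : Int) - (st.2 : Int)], j))
      ([], 0)).1 = [(n0 : Int), n1, n2, n3, n4] := by
  have hR : PySem.List.pyRange 0 5 1 = [0, 1, 2, 3, 4] := by decide
  have h0 : segcpAdvance (segcpRep n0 n1 n2 n3 n4) 0 (segcpRep n0 n1 n2 n3 n4).length 0 = n0 := by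
    have := segcpAdvance_run 0 (List.replicate n0 0) []
      (List.replicate n1 1 ++ List.replicate n2 2 ++ List.replicate n3 3 ++ List.replicate n4 4)
      (segcpRep n0 n1 n2 n3 n4).length
      (by simp [segcpRep]; try omega)
      (fun x hx => List.eq_of_mem_replicate hx)
      (by intro x hx; simp [List.mem_append, List.mem_replicate] at hx; omega)
    simpa [segcpRep, Nat.add_assoc] using this
  have h1 : segcpAdvance (segcpRep n0 n1 n2 n3 n4) 1 (segcpRep n0 n1 n2 n3 n4).length n0
      = n0 + n1 := by
    have := segcpAdvance_run 1 (List.replicate n1 1) (List.replicate n0 0)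
      (List.replicate n2 2 ++ List.replicate n3 3 ++ List.replicate n4 4)
      (segcpRep n0 n1 n2 n3 n4).length
      (by simp [segcpRep]; try omega)
      (fun x hx => List.eq_of_mem_replicate hx)
      (by intro x hx; simp [List.mem_append, List.mem_replicate] at hx; omega)
    simpa [segcpRep, Nat.add_assoc] using this
  have h2 : segcpAdvance (segcpRep n0 n1 n2 n3 n4) 2 (segcpRep n0 n1 n2 n3 n4).length (n0 + n1)
      = n0 + (n1 + n2) := by
    have := segcpAdvance_run 2 (List.replicate n2 2)
      (List.replicate n0 0 ++ List.replicate n1 1)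
      (List.replicate n3 3 ++ List.replicate n4 4)
      (segcpRep n0 n1 n2 n3 n4).length
      (by simp [segcpRep]; try omega)
      (fun x hx => List.eq_of_mem_replicate hx)
      (by intro x hx; simp [List.mem_append, List.mem_replicate] at hx; omega)
    simpa [segcpRep, Nat.add_assoc] using this
  have h3 : segcpAdvance (segcpRep n0 n1 n2 n3 n4) 3 (segcpRep n0 n1 n2 n3 n4).length
      (n0 + (n1 + n2)) = n0 + (n1 + (n2 + n3)) := by
    have := segcpAdvance_run 3 (List.replicate n3 3)
      (List.replicate n0 0 ++ List.replicate n1 1 ++ List.replicate n2 2)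
      (List.replicate n4 4)
      (segcpRep n0 n1 n2 n3 n4).length
      (by simp [segcpRep]; try omega)
      (fun x hx => List.eq_of_mem_replicate hx)
      (by intro x hx; simp [List.mem_replicate] at hx; omega)
    simpa [segcpRep, Nat.add_assoc] using this
  have h4 : segcpAdvance (segcpRep n0 n1 n2 n3 n4) 4 (segcpRep n0 n1 n2 n3 n4).length
      (n0 + (n1 + (n2 + n3))) = n0 + (n1 + (n2 + (n3 + n4))) := by
    have := segcpAdvance_run 4 (List.replicate n4 4)
      (List.replicate n0 0 ++ List.replicate n1 1 ++ List.replicate n2 2 ++ List.replicate n3 3)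
      []
      (segcpRep n0 n1 n2 n3 n4).length
      (by simp [segcpRep]; try omega)
      (fun x hx => List.eq_of_mem_replicate hx)
      (by intro x hx; simp at hx)
    simpa [segcpRep, Nat.add_assoc] using this
  rw [hR]
  simp only [List.foldl_cons, List.foldl_nil, h0, h1, h2, h3, h4]
  push_cast
  simp

theorem segcp_spec : Claim_equal_segcp := by
  intro arr1 arr2 cpval hdom hpre
  unfold Spec_segcp segcp segcp_alt
  rw [PySem.List.pyRange_zero_natCast]
  rw [segcp_fold_eq_tally, segcpTally_eq_counts]
  simp only [List.filter_map, List.map_map, Function.comp_def,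
    PySem.List.pyGetD_natCast]
  rw [segcp_idx_eq_zip arr1 arr2 cpval hpre]
  have hall : ∀ x ∈ ((arr1.zip arr2).filter
      (fun p => decide (p.1 = cpval ∧ 0 ≤ p.2 ∧ p.2 ≤ 4))).map Prod.snd,
      0 ≤ x ∧ x ≤ 4 := by
    intro x hx
    simp only [List.mem_map, List.mem_filter, decide_eq_true_eq] at hx
    obtain ⟨p, ⟨_, hp⟩, rfl⟩ := hx
    exact ⟨hp.2.1, hp.2.2⟩
  rw [sorted_eq_rep _ hall]
  rw [segcp_alt_fold]
  have hbase : ((arr1.zip arr2).filter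
        (fun p => decide (p.1 = cpval ∧ 0 ≤ p.2 ∧ p.2 ≤ 4))).map Prod.snd
      = (((arr1.zip arr2).filter (fun p => decide (p.1 = cpval))).map Prod.snd).filter
        (fun x => decide (0 ≤ x ∧ x ≤ 4)) := by
    rw [List.filter_map, List.filter_filter]
    congr 1
    apply List.filter_congr
    intro p _
    simp only [Function.comp_def, Bool.decide_and]
    rw [Bool.and_comm]
  rw [hbase]
  have hc : ∀ v : Int, (decide (0 ≤ v ∧ v ≤ 4) = true) →
      ((((arr1.zip arr2).filter (fun p => decide (p.1 = cpval))).map Prod.snd).filter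
        (fun x => decide (0 ≤ x ∧ x ≤ 4))).count v
      = (((arr1.zip arr2).filter (fun p => decide (p.1 = cpval))).map Prod.snd).count v := by
    intro v hv
    exact List.count_filter hv
  rw [hc 0 (by decide), hc 1 (by decide), hc 2 (by decide), hc 3 (by decide), hc 4 (by decide)]
  simp
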